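-- pv_equiv track=rewrite | github.com/suyash8991/agentic-rag-moffitt | src/moffitt_rag/tools/interest_match.py | _find_relevant_interests
-- ===== SOURCE A (Python) =====
-- from typing import List, Dict, Any, Optional, Tuple
--
-- def _find_relevant_interests(interests: List[str], query: str) -> List[str]:
--     """
--     Find the most relevant interests from a list based on a query.
--
--     Args:
--         interests (List[str]): The list of interests
--         query (str): The query to match against
--
--     Returns:
--         List[str]: The most relevant interests
--     """
--     if not interests:
--         return []
--
--     # Split query into terms
--     query_terms = query.lower().split()
--
--     # Score each interest based on term overlap
--     scored_interests = []
--     for interest in interests: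
--         # Count the number of query terms that appear in the interest
--         score = sum(1 for term in query_terms if term.lower() in interest.lower())
--         scored_interests.append((interest, score))
--
--     # Sort by score (descending) and return those with any match
--     sorted_interests = [i for i, s in sorted(scored_interests, key=lambda x: x[1], reverse=True) if s > 0]
--     return sorted_interests
-- ===== SOURCE B (Python) =====
-- def _find_relevant_interests(interests, query):
--     if not interests:
--         return []
--     query_terms = query.lower().split()
--     buckets = {}
--     for interest in interests:
--         score = sum(1 for term in query_terms if term.lower() in interest.lower())
--         buckets.setdefault(score, []).append(interest)
--     result = []
--     for s in range(len(query_terms), 0, -1):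
--         result.extend(buckets.get(s, []))
--     return result
-- ===== Notes on version B (the rewrite author's own statement) =====
-- stated objective: alternative
-- what changed: Replaces the stable comparison sort over (interest, score) pairs by bucket grouping: scores are bounded by the number of query terms, so B groups interests into a dict keyed by score (in input order, preserving stability) and concatenates the buckets from the highest score down to 1.
import Mathlib
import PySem

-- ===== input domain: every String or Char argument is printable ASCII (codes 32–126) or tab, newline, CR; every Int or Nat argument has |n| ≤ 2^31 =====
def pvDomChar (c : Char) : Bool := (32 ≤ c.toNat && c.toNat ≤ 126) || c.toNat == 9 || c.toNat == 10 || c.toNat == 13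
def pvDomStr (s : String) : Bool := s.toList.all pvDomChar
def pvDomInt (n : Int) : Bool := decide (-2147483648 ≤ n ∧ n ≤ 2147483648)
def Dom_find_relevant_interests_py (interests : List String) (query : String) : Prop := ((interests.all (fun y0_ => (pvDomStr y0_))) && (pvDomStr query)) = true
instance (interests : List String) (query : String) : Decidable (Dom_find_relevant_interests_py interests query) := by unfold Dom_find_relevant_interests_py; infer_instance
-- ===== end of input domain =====

-- B replaces A's stable comparison sort by bucket grouping on the (bounded) score, concatenated
-- from the highest score down to 1; same return value, different algorithm (objective: alternative).

-- shared helper: the score expression 'sum(1 for term in query_terms if term.lower() in interest.lower())',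
-- identical in both Python sources
def pvScore (query_terms : List String) (interest : String) : Int :=
  ((query_terms.filter
      (fun term => PySem.Str.isIn (PySem.Str.lower term) (PySem.Str.lower interest))).map
    (fun _ => (1 : Int))).sum

-- ===== PORT A =====
def find_relevant_interests_py (interests : List String) (query : String) : List String :=
  if interests = [] then []
  else
    let query_terms := PySem.Str.split₀ (PySem.Str.lower query)
    let scored_interests :=
      interests.foldl (fun acc interest => acc ++ [(interest, pvScore query_terms interest)]) []
    ((PySem.List.sorted scored_interests (fun x => x.2) true).filter
        (fun x => decide (0 < x.2))).map (fun x => x.1)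

-- ===== PORT B =====
def find_relevant_interests_py_alt (interests : List String) (query : String) : List String :=
  if interests = [] then []
  else
    let query_terms := PySem.Str.split₀ (PySem.Str.lower query)
    let buckets : PySem.Dict Int (List String) :=
      interests.foldl
        (fun d interest =>
          let s := pvScore query_terms interest
          d.insert s (d.getD s [] ++ [interest]))
        PySem.Dict.empty
    (PySem.List.pyRange (query_terms.length : Int) 0 (-1)).foldl
      (fun result s => result ++ buckets.getD s []) []

-- ===== PRECONDITION & SPEC =====
def Spec_find_relevant_interests_py (interests : List String) (query : String) (out : List String) : Prop := out = find_relevant_interests_py_alt interests query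
instance (interests : List String) (query : String) (out : List String) : Decidable (Spec_find_relevant_interests_py interests query out) := by unfold Spec_find_relevant_interests_py; infer_instance

-- ===== CLAIM (what is proved, stated in full; the proofs are below) =====
def Claim_equal_find_relevant_interests_py : Prop := ∀ (interests : List String) (query : String), Dom_find_relevant_interests_py interests query → Spec_find_relevant_interests_py interests query (find_relevant_interests_py interests query)

-- ===== LEMMAS AND PROOFS =====

-- insertBy passes over a block whose elements all refuse 'before'
lemma pv_insertBy_append_left {α : Type} (before : α → α → Bool) (x : α) (A B : List α)
    (h : ∀ y ∈ A, before x y = false) :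
    PySem.List.insertBy before x (A ++ B) = A ++ PySem.List.insertBy before x B := by
  induction A with
  | nil => simp
  | cons a A ih =>
    simp only [List.cons_append, PySem.List.insertBy, h a (by simp)]
    simp only [Bool.false_eq_true, if_false, List.cons.injEq, true_and]
    exact ih (fun y hy => h y (by simp [hy]))

-- insertBy lands at the front of a block whose elements all accept 'before'
lemma pv_insertBy_all_before {α : Type} (before : α → α → Bool) (x : α) (B : List α)
    (h : ∀ y ∈ B, before x y = true) :
    PySem.List.insertBy before x B = x :: B := by
  cases B with
  | nil => rfl
  | cons b B => simp [PySem.List.insertBy, h b (by simp)]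

-- one insertion into the bucket concatenation = append into its own bucket
lemma pv_insertBy_bcat {α : Type} (key : α → Int) (ks : List Int)
    (hks : ks.Pairwise (fun a b => b < a)) (x : α) (hx : key x ∈ ks) (xs : List α) :
    PySem.List.insertBy (fun a b => decide (key b < key a)) x
        (ks.flatMap (fun k => xs.filter (fun y => decide (key y = k))))
      = ks.flatMap (fun k => (xs ++ [x]).filter (fun y => decide (key y = k))) := by
  induction ks with
  | nil => simp at hx
  | cons k ks ih =>
    have hlt : ∀ k' ∈ ks, k' < k := (List.pairwise_cons.mp hks).1
    simp only [List.flatMap_cons]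
    by_cases hk : key x = k
    · rw [pv_insertBy_append_left _ _ _ _
        (fun y hy => by
          have : key y = k := by simpa using (List.mem_filter.mp hy).2
          simp [this, hk])]
      rw [pv_insertBy_all_before _ _ _
        (fun y hy => by
          rcases List.mem_flatMap.mp hy with ⟨k', hk', hy'⟩
          have : key y = k' := by simpa using (List.mem_filter.mp hy').2
          simp [this, hk ▸ hlt k' hk'])]
      have h1 : (xs ++ [x]).filter (fun y => decide (key y = k))
          = xs.filter (fun y => decide (key y = k)) ++ [x] := by
        simp [List.filter_append, hk]
      have h2 : ks.flatMap (fun k' => (xs ++ [x]).filter (fun y => decide (key y = k')))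
          = ks.flatMap (fun k' => xs.filter (fun y => decide (key y = k'))) := by
        apply List.flatMap_congr
        intro k' hk'
        have : key x ≠ k' := by have := hlt k' hk'; omega
        simp [List.filter_append, this]
      rw [h1, h2]; simp
    · have hx' : key x ∈ ks := (List.mem_cons.mp hx).resolve_left hk
      have hxlt : key x < k := hlt _ hx'
      rw [pv_insertBy_append_left _ _ _ _
        (fun y hy => by
          have : key y = k := by simpa using (List.mem_filter.mp hy).2
          simp [this]; omega)]
      have h1 : (xs ++ [x]).filter (fun y => decide (key y = k))
          = xs.filter (fun y => decide (key y = k)) := by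
        simp [List.filter_append, hk]
      rw [ih (List.Pairwise.sublist (List.sublist_cons_self k ks) hks) hx', h1]

-- Python's stable reverse sort over keys drawn from a strictly decreasing key list
-- is the concatenation of the key buckets in that order
lemma pv_sorted_rev_eq_bcat {α : Type} (key : α → Int) (ks : List Int)
    (hks : ks.Pairwise (fun a b => b < a)) (xs : List α)
    (hx : ∀ x ∈ xs, key x ∈ ks) :
    PySem.List.sorted xs key true
      = ks.flatMap (fun k => xs.filter (fun y => decide (key y = k))) := by
  rw [PySem.List.sorted_rev_eq_foldl_insertBy]
  induction xs using List.reverseRecOn with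
  | nil => simp
  | append_singleton xs x ih =>
    rw [List.foldl_append, List.foldl_cons, List.foldl_nil,
      ih (fun y hy => hx y (by simp [hy])),
      pv_insertBy_bcat key ks hks x (hx x (by simp))]

-- the grouping dict of port B, read back bucket by bucket
lemma pv_buckets_getD (f : String → Int) (interests : List String) (k : Int) :
    (interests.foldl
        (fun (d : PySem.Dict Int (List String)) interest =>
          d.insert (f interest) (d.getD (f interest) [] ++ [interest]))
        PySem.Dict.empty).getD k []
      = interests.filter (fun i => decide (f i = k)) := by
  induction interests using List.reverseRecOn with
  | nil => rfl
  | append_singleton xs x ih =>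
    rw [List.foldl_append, List.foldl_cons, List.foldl_nil]
    rw [PySem.Dict.getD_insert, List.filter_append]
    by_cases hk : k = f x
    · subst hk
      simp [ih]
    · have hne : ¬ (f x = k) := fun h => hk h.symm
      rw [if_neg hk, ih]
      simp [hne]

-- each score lies in [0, len(query_terms)]
lemma pv_score_bounds (qt : List String) (i : String) :
    0 ≤ pvScore qt i ∧ pvScore qt i ≤ (qt.length : Int) := by
  unfold pvScore
  rw [PySem.List.sum_map_const_int, mul_one]
  have h := List.length_filter_le
    (fun term => PySem.Str.isIn (PySem.Str.lower term) (PySem.Str.lower i)) qt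
  exact ⟨by positivity, by exact_mod_cast h⟩

-- range(T, -1, -1) = range(T, 0, -1) ++ [0]  for T = a natural number
lemma pv_pyRange_split (T : Nat) :
    PySem.List.pyRange (T : Int) (-1) (-1) = PySem.List.pyRange (T : Int) 0 (-1) ++ [(0 : Int)] := by
  rw [PySem.List.pyRange_neg_one, PySem.List.pyRange_neg_one]
  have h1 : ((T : Int) - (-1)).toNat = T + 1 := by omega
  have h2 : ((T : Int) - 0).toNat = T := by omega
  rw [h1, h2, List.range_succ]
  simp

lemma pv_pairwise_pyRange_neg_one (a b : Int) :
    (PySem.List.pyRange a b (-1)).Pairwise (fun x y => y < x) := by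
  rw [PySem.List.pyRange_neg_one]
  rw [List.pairwise_map]
  exact List.pairwise_lt_range.imp (fun h => by omega)

-- ===== VERDICT (by name: the statement is the Claim_ definition above) =====
-- the whole nonempty branch, with the score function abstracted
lemma pv_main (f : String → Int) (n : Nat) (interests : List String)
    (hf : ∀ i ∈ interests, 0 ≤ f i ∧ f i ≤ (n : Int)) :
    ((PySem.List.sorted (interests.map fun i => (i, f i)) (fun x => x.2) true).filter
        (fun x => decide (0 < x.2))).map (fun x => x.1)
      = (PySem.List.pyRange (n : Int) 0 (-1)).foldl
          (fun result s => result ++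
            (interests.foldl (fun (d : PySem.Dict Int (List String)) i =>
                d.insert (f i) (d.getD (f i) [] ++ [i])) PySem.Dict.empty).getD s []) [] := by
  have hsorted := pv_sorted_rev_eq_bcat (fun x : String × Int => x.2)
    (PySem.List.pyRange (n : Int) (-1) (-1))
    (pv_pairwise_pyRange_neg_one _ _)
    (interests.map (fun i => (i, f i)))
    (by
      intro x hx
      rcases List.mem_map.mp hx with ⟨i, hi, rfl⟩
      rw [PySem.List.mem_pyRange_neg_one]
      obtain ⟨hb1, hb2⟩ := hf i hi
      exact ⟨by simpa using by omega, by simpa using hb2⟩)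
  rw [hsorted, pv_pyRange_split]
  rw [PySem.List.foldl_append_eq_flatMap
    (g := fun s => (interests.foldl (fun (d : PySem.Dict Int (List String)) i =>
        d.insert (f i) (d.getD (f i) [] ++ [i])) PySem.Dict.empty).getD s [])]
  rw [List.nil_append, List.flatMap_append]
  have hzero : ([(0 : Int)].flatMap (fun k =>
      ((interests.map (fun i => (i, f i))).filter
        (fun y => decide (y.2 = k))))).filter (fun x => decide (0 < x.2)) = [] := by
    simp only [List.flatMap_cons, List.flatMap_nil, List.append_nil]
    apply List.filter_eq_nil_iff.mpr
    intro x hx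
    have : x.2 = 0 := by simpa using (List.mem_filter.mp hx).2
    simp [this]
  rw [List.filter_append, hzero, List.append_nil]
  rw [List.filter_flatMap, List.map_flatMap]
  apply List.flatMap_congr
  intro k hk
  have hkpos : 0 < k := (PySem.List.mem_pyRange_neg_one.mp hk).1
  have h1 : ((interests.map (fun i => (i, f i))).filter
        (fun y => decide (y.2 = k))).filter (fun x => decide (0 < x.2))
      = (interests.map (fun i => (i, f i))).filter (fun y => decide (y.2 = k)) := by
    apply List.filter_eq_self.mpr
    intro x hx
    have : x.2 = k := by simpa using (List.mem_filter.mp hx).2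
    simp [this]
    omega
  rw [h1, pv_buckets_getD f interests k, List.filter_map]
  simp [Function.comp_def]

-- ===== VERDICT (by name: the statement is the Claim_ definition above) =====
theorem find_relevant_interests_py_spec : Claim_equal_find_relevant_interests_py := by
  intro interests query _
  unfold Spec_find_relevant_interests_py
  by_cases h : interests = []
  · simp [find_relevant_interests_py, find_relevant_interests_py_alt, h]
  · simp only [find_relevant_interests_py, find_relevant_interests_py_alt, if_neg h]
    have hscored : interests.foldl
        (fun acc interest => acc ++ [(interest, pvScore (PySem.Str.split₀ (PySem.Str.lower query)) interest)]) []
        = interests.map (fun i => (i, pvScore (PySem.Str.split₀ (PySem.Str.lower query)) i)) := by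
      simpa using PySem.List.foldl_append_singleton_eq_map
        (l := interests)
        (f := fun i => (i, pvScore (PySem.Str.split₀ (PySem.Str.lower query)) i)) (acc := [])
    rw [hscored]
    exact pv_main (pvScore (PySem.Str.split₀ (PySem.Str.lower query)))
      (PySem.Str.split₀ (PySem.Str.lower query)).length interests
      (fun i _ => pv_score_bounds (PySem.Str.split₀ (PySem.Str.lower query)) i)
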